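-- pv_equiv track=rewrite | github.com/seongeun42/Algorithm-Solved | 백준/Silver/20364. 부동산 다툼/부동산 다툼.py | dfs
-- ===== SOURCE A (Python) =====
-- def dfs(pre, idx, live):
--     if pre == 1:
--         return idx
--     parent = pre // 2
--     if parent in live:
--         idx = dfs(parent, parent, live)
--     else:
--         idx = dfs(parent, idx, live)
--     return idx
-- ===== SOURCE B (Python) =====
-- def dfs(pre, idx, live):
--     ancestors = []
--     cur = pre
--     while cur > 1:
--         cur //= 2
--         ancestors.append(cur)
--     occupied = [a for a in ancestors if a in live]
--     return occupied[-1] if occupied else idx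
-- ===== Notes on version B (the rewrite author's own statement) =====
-- stated objective: alternative
-- what changed: Replaces the tail recursion up the tree with an explicit ancestor-chain list (pre//2, pre//4, ..., 1) followed by a membership filter, returning the last (topmost) occupied ancestor or idx.
import Mathlib
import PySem

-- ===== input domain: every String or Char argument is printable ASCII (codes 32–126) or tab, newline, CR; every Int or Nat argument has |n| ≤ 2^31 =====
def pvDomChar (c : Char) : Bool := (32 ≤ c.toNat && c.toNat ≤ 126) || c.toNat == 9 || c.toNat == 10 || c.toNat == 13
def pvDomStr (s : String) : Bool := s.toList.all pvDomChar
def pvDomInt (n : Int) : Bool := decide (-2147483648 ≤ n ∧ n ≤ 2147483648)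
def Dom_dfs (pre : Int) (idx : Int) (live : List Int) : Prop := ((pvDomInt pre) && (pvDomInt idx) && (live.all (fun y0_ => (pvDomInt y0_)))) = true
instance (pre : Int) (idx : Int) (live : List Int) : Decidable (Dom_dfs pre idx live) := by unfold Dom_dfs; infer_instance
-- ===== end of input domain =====

-- B replaces A's tail recursion with an explicit ancestor-chain list plus a membership filter (alternative decomposition, same cost).


-- ===== PORT A =====
-- literal transliteration of A's tail recursion; for pre ≤ 0 the Python diverges
-- (excluded by Pre_dfs), so the ≤-guard only serves Lean's termination there.
def dfs (pre : Int) (idx : Int) (live : List Int) : Int :=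
  if pre ≤ 1 then idx
  else
    let parent := PySem.Int.floordiv pre 2
    if live.contains parent then dfs parent parent live
    else dfs parent idx live
termination_by pre.toNat
decreasing_by
  all_goals
    simp only [PySem.Int.floordiv_eq_ediv_of_pos (by omega : (0:Int) < 2)]
    omega

-- ===== PORT B =====
-- the while-loop of Source B collecting the ancestor chain pre//2, pre//4, …, 1
def ancChain (cur : Int) : List Int :=
  if cur ≤ 1 then []
  else
    let p := PySem.Int.floordiv cur 2
    p :: ancChain p
termination_by cur.toNat
decreasing_by
  simp only [PySem.Int.floordiv_eq_ediv_of_pos (by omega : (0:Int) < 2)]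
  omega

def dfs_alt (pre : Int) (idx : Int) (live : List Int) : Int :=
  let ancestors := ancChain pre
  let occupied := ancestors.filter (fun a => live.contains a)
  (occupied.getLast?).getD idx

-- ===== PRECONDITION & SPEC =====
-- A recurses pre -> pre//2 and only stops at 1, so it returns (no RecursionError) exactly when 1 ≤ pre.
def Pre_dfs (pre : Int) (idx : Int) (live : List Int) : Prop := 1 ≤ pre
instance (pre : Int) (idx : Int) (live : List Int) : Decidable (Pre_dfs pre idx live) := by unfold Pre_dfs; infer_instance
def pvWitness_dfs : Int × Int × List Int := (8, 8, [2, 5])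

def Spec_dfs (pre : Int) (idx : Int) (live : List Int) (out : Int) : Prop := out = dfs_alt pre idx live
instance (pre : Int) (idx : Int) (live : List Int) (out : Int) : Decidable (Spec_dfs pre idx live out) := by unfold Spec_dfs; infer_instance

-- ===== CLAIM (what is proved, stated in full; the proofs are below) =====
def Claim_equal_dfs : Prop := ∀ (pre : Int) (idx : Int) (live : List Int), Dom_dfs pre idx live → Pre_dfs pre idx live → Spec_dfs pre idx live (dfs pre idx live)

-- ===== LEMMAS AND PROOFS =====
theorem getLast?_getD_cons (p d : Int) (l : List Int) :
    ((p :: l).getLast?).getD d = (l.getLast?).getD p := by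
  cases l with
  | nil => rfl
  | cons a l =>
    rw [List.getLast?_cons_cons]
    cases h : (a :: l).getLast? with
    | none => simp [List.getLast?_eq_none_iff] at h
    | some x => rfl

theorem dfs_eq_alt (pre idx : Int) (live : List Int) :
    dfs pre idx live = dfs_alt pre idx live := by
  unfold dfs_alt
  refine dfs.induct live
    (motive := fun pre idx =>
      dfs pre idx live =
        ((ancChain pre).filter (fun a => live.contains a)).getLast?.getD idx)
    ?_ ?_ ?_ pre idx
  · intro pre idx h
    rw [dfs, ancChain]
    simp [h]
  · intro pre idx h parent hmem ih
    simp only [] at ih ⊢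
    rw [dfs.eq_def, ancChain]
    simp only [if_neg h]
    rw [if_pos hmem, ih, List.filter_cons, if_pos hmem]
    exact (getLast?_getD_cons _ idx _).symm
  · intro pre idx h parent hmem ih
    simp only [] at ih ⊢
    rw [dfs.eq_def, ancChain]
    simp only [if_neg h]
    rw [if_neg hmem, ih, List.filter_cons, if_neg hmem]

-- ===== VERDICT (by name: the statement is the Claim_ definition above) =====
theorem dfs_spec : Claim_equal_dfs := by
  intro pre idx live _ _
  exact dfs_eq_alt pre idx live
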